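-- pv_equiv track=rewrite | github.com/Danish-H/EzEnrol | main.py | generate_schedules
-- ===== SOURCE A (Python) =====
-- def generate_schedules(course_names, current_schedule=[]):
--     if len(course_names) == 0:
--         return [tuple(current_schedule)]
--     schedules = []
--     for i in range(len(course_names[0])):
--         new_schedule = current_schedule + [i]
--         schedules.extend(generate_schedules(course_names[1:], new_schedule))
--     return schedules
-- ===== SOURCE B (Python) =====
-- def generate_schedules(course_names, current_schedule=[]):
--     sizes = [len(c) for c in course_names]
--     total = 1
--     for s in sizes:
--         total *= s
--     out = []
--     for k in range(total):
--         digits = []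
--         r = k
--         for s in reversed(sizes):
--             digits.append(r % s)
--             r //= s
--         out.append(tuple(current_schedule) + tuple(reversed(digits)))
--     return out
-- ===== Notes on version B (the rewrite author's own statement) =====
-- stated objective: alternative
-- what changed: Replaced the recursion (which slices course_names and extends an accumulator per call) with mixed-radix decoding: compute the product of the course sizes once, then decode each index k in range(total) into its digit tuple; no recursion and no intermediate schedule lists.
import Mathlib
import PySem

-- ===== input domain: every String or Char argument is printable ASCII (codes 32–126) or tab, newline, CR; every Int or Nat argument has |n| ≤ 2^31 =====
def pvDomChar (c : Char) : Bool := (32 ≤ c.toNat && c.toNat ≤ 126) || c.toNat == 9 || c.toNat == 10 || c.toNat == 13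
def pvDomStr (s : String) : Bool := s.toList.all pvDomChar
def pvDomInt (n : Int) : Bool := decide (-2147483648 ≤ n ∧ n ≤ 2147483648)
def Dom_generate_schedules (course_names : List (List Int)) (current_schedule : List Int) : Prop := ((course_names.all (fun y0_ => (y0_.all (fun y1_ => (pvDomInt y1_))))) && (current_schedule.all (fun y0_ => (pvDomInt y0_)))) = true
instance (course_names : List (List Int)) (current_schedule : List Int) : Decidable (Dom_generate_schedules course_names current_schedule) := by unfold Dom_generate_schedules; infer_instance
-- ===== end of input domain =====

-- B replaces A's recursion by mixed-radix decoding: it counts k from 0 to the product of the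
-- course sizes and decodes each k into its digit tuple (alternative decomposition, same cost).

-- ===== PORT A =====
-- Literal port of A: recursion on course_names; loop over range(len(course_names[0]))
-- extending an accumulator with the recursive results.
def generate_schedules (course_names : List (List Int)) (current_schedule : List Int) : List (List Int) :=
  match course_names with
  | [] => [current_schedule]
  | c :: rest =>
    (List.range c.length).foldl
      (fun schedules i => schedules ++ generate_schedules rest (current_schedule ++ [Int.ofNat i])) []

-- ===== PORT B =====
-- Port of B: total = product of sizes; each k in range(total) is decoded into its
-- mixed-radix digits (least-significant course last), then reversed and prefixed.
def generate_schedules_alt (course_names : List (List Int)) (current_schedule : List Int) : List (List Int) :=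
  let sizes := course_names.map List.length
  let total := sizes.foldl (· * ·) 1
  (List.range total).map (fun k =>
    let digits :=
      (sizes.reverse.foldl (fun (p : List Nat × Nat) s => (p.1 ++ [p.2 % s], p.2 / s))
        (([] : List Nat), k)).1
    current_schedule ++ digits.reverse.map Int.ofNat)

-- ===== PRECONDITION & SPEC =====
def Spec_generate_schedules (course_names : List (List Int)) (current_schedule : List Int) (out : List (List Int)) : Prop := out = generate_schedules_alt course_names current_schedule
instance (course_names : List (List Int)) (current_schedule : List Int) (out : List (List Int)) : Decidable (Spec_generate_schedules course_names current_schedule out) := by unfold Spec_generate_schedules; infer_instance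

-- ===== CLAIM (what is proved, stated in full; the proofs are below) =====
def Claim_equal_generate_schedules : Prop := ∀ (course_names : List (List Int)) (current_schedule : List Int), Dom_generate_schedules course_names current_schedule → Spec_generate_schedules course_names current_schedule (generate_schedules course_names current_schedule)

-- ===== LEMMAS AND PROOFS =====

-- LSB-first mixed-radix digits of k for the radix list l.
def pvDig : List Nat → Nat → List Nat
  | [], _ => []
  | s :: t, k => (k % s) :: pvDig t (k / s)

lemma pvFold_eq (l : List Nat) (ds : List Nat) (k : Nat) :
    l.foldl (fun (p : List Nat × Nat) s => (p.1 ++ [p.2 % s], p.2 / s)) (ds, k)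
      = (ds ++ pvDig l k, k / l.prod) := by
  induction l generalizing ds k with
  | nil => simp [pvDig]
  | cons s t ih =>
    simp only [List.foldl_cons, ih, pvDig, List.prod_cons, Prod.mk.injEq]
    exact ⟨by simp, by rw [Nat.div_div_eq_div_mul]⟩

lemma pvDig_add_mul (l : List Nat) (k m : Nat) :
    pvDig l (k + m * l.prod) = pvDig l k := by
  induction l generalizing k m with
  | nil => rfl
  | cons s t ih =>
    rcases Nat.eq_zero_or_pos s with hs | hs
    · subst hs; simp [pvDig]
    · simp only [pvDig, List.prod_cons]
      rw [show k + m * (s * t.prod) = k + m * t.prod * s by ring,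
        Nat.add_mul_mod_self_right, Nat.add_mul_div_right _ _ hs, ih]

lemma pvDig_append (l : List Nat) (s k : Nat) :
    pvDig (l ++ [s]) k = pvDig l k ++ [(k / l.prod) % s] := by
  induction l generalizing k with
  | nil => simp [pvDig]
  | cons a t ih =>
    simp only [List.cons_append, pvDig, ih, List.prod_cons, List.cons_append]
    rw [Nat.div_div_eq_div_mul]

lemma pvRange_mul (s T : Nat) :
    List.range (s * T) = (List.range s).flatMap (fun i => (List.range T).map (fun r => i * T + r)) := by
  induction s with
  | zero => simp
  | succ n ih =>
    rw [Nat.succ_mul, List.range_add, ih, List.range_succ, List.flatMap_append]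
    simp [List.flatMap_cons, Nat.add_comm]

-- A's cons-case unfolded to a flatMap.
lemma gen_cons (c : List Int) (rest : List (List Int)) (cur : List Int) :
    generate_schedules (c :: rest) cur
      = (List.range c.length).flatMap (fun i => generate_schedules rest (cur ++ [Int.ofNat i])) := by
  show (List.range c.length).foldl
      (fun schedules i => schedules ++ generate_schedules rest (cur ++ [Int.ofNat i])) []
    = _
  induction (List.range c.length) using List.reverseRecOn with
  | nil => simp
  | append_singleton xs x ih => simp [List.foldl_append, List.flatMap_def]

-- B in decoded form.
lemma alt_eq (cs : List (List Int)) (cur : List Int) :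
    generate_schedules_alt cs cur
      = (List.range ((cs.map List.length).prod)).map
          (fun k => cur ++ ((pvDig (cs.map List.length).reverse k).reverse.map Int.ofNat)) := by
  unfold generate_schedules_alt
  simp only [pvFold_eq, List.nil_append]
  rw [← List.prod_eq_foldl]

-- A computes exactly the decoded enumeration.
lemma gen_decode (cs : List (List Int)) (cur : List Int) :
    generate_schedules cs cur
      = (List.range ((cs.map List.length).prod)).map
          (fun k => cur ++ ((pvDig (cs.map List.length).reverse k).reverse.map Int.ofNat)) := by
  induction cs generalizing cur with
  | nil => simp [generate_schedules, pvDig]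
  | cons c rest ih =>
    rw [gen_cons]
    simp only [List.map_cons, List.prod_cons, List.reverse_cons]
    rw [pvRange_mul, List.map_flatMap]
    refine List.flatMap_congr ?_
    intro i hi
    rw [ih, List.map_map]
    refine List.map_congr_left ?_
    intro r hr
    have hiT : i < c.length := List.mem_range.mp hi
    have hrT : r < (rest.map List.length).prod := List.mem_range.mp hr
    simp only [Function.comp_def]
    rw [pvDig_append]
    have h1 : pvDig (rest.map List.length).reverse (i * (rest.map List.length).prod + r)
        = pvDig (rest.map List.length).reverse r := by
      rw [Nat.add_comm, ← List.prod_reverse (rest.map List.length)]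
      exact pvDig_add_mul _ r i
    have h2 : (i * (rest.map List.length).prod + r) / ((rest.map List.length).reverse).prod
        = i := by
      rw [List.prod_reverse, Nat.mul_comm i, Nat.mul_add_div (Nat.lt_of_le_of_lt (Nat.zero_le r) hrT),
        Nat.div_eq_of_lt hrT, Nat.add_zero]
    rw [h1, h2, Nat.mod_eq_of_lt hiT]
    simp

-- ===== VERDICT (by name: the statement is the Claim_ definition above) =====

theorem generate_schedules_spec : Claim_equal_generate_schedules := by
  intro cs cur _
  show _ = generate_schedules_alt cs cur
  rw [alt_eq, gen_decode]
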